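-- pv_equiv track=rewrite | github.com/CrispyW0nton/GModular | gmodular/gui/room_assembly.py | _parse_vis
-- ===== SOURCE A (Python) =====
-- from typing import Dict, List, Optional, Set, Tuple
--
-- def _parse_vis(text: str) -> Dict[str, List[str]]:
--     """
--     Parse a KotOR .vis plain-text file into a dict of {room_name: [visible_rooms]}.
--
--     .vis format::
--         room1
--         room1
--         room2
--         (blank line ends section)
--         room2
--         room1
--         room2
--     """
--     result: Dict[str, List[str]] = {}
--     lines = [l.strip() for l in text.splitlines()]
--     i = 0
--     while i < len(lines):
--         line = lines[i]; i += 1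
--         if not line or line.startswith("#"):
--             continue
--         room_name = line.lower()
--         visible: List[str] = []
--         while i < len(lines):
--             vline = lines[i]
--             if not vline or vline.startswith("#"):
--                 i += 1
--                 break
--             visible.append(vline.lower())
--             i += 1
--         result[room_name] = visible
--     return result
-- ===== SOURCE B (Python) =====
-- def _parse_vis(text):
--     """Group stripped lines into blocks separated by blank/'#' lines, then map each block to a dict entry."""
--     blocks = []
--     cur = []
--     for raw in text.splitlines():
--         line = raw.strip()
--         if not line or line.startswith("#"):
--             if cur:
--                 blocks.append(cur)
--                 cur = []
--         else:
--             cur.append(line)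
--     if cur:
--         blocks.append(cur)
--     result = {}
--     for block in blocks:
--         result[block[0].lower()] = [l.lower() for l in block[1:]]
--     return result
-- ===== Notes on version B (the rewrite author's own statement) =====
-- stated objective: simpler
-- what changed: Replaces A's interleaved index-based outer/inner while-loops with a single forward pass that groups stripped lines into blocks (separated by blank/'#' lines) followed by a second pass mapping each block to a dict entry.
import Mathlib
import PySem

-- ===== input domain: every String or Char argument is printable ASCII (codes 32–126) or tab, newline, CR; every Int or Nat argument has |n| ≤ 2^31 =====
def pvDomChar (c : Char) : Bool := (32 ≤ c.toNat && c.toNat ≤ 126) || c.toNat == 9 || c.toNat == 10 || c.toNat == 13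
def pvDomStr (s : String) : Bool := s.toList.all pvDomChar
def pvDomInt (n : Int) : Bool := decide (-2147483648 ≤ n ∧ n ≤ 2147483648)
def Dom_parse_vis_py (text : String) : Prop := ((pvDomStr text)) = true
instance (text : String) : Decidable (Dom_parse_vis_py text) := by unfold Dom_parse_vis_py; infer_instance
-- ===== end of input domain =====

-- B replaces A's index-walk with a group-lines-into-blocks pass then a map over blocks (objective: simpler).

-- ===== PORT A =====
-- inner 'while i < len(lines)' loop of A: consumes lines up to and including the first
-- blank/'#' separator, returning (lowered collected lines, remaining lines)
def pvCollectA : List String → List String × List String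
  | [] => ([], [])
  | v :: r =>
    if (v == "") || PySem.Str.startswith v "#" then ([], r)
    else
      let p := pvCollectA r
      (PySem.Str.lower v :: p.1, p.2)

theorem pvCollectA_len (ls : List String) : (pvCollectA ls).2.length ≤ ls.length := by
  induction ls with
  | nil => simp [pvCollectA]
  | cons v r ih => simp only [pvCollectA]; split <;> simp <;> omega

-- outer 'while i < len(lines)' loop of A
def pvLoopA (lines : List String) (result : PySem.Dict String (List String)) :
    PySem.Dict String (List String) :=
  match lines with
  | [] => result
  | line :: rest =>
    if (line == "") || PySem.Str.startswith line "#" then pvLoopA rest result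
    else
      let p := pvCollectA rest
      pvLoopA p.2 (result.insert (PySem.Str.lower line) p.1)
termination_by lines.length
decreasing_by
  all_goals have := pvCollectA_len rest
  all_goals simp
  all_goals omega

def parse_vis_py (text : String) : List (String × List String) :=
  (pvLoopA ((PySem.Str.splitlines text).map PySem.Str.strip) PySem.Dict.empty).items

-- ===== PORT B =====
-- B's first pass: group the stripped lines into blocks, separators close the current block
def pvBlocksB : List String → List String → List (List String) → List (List String)
  | [], cur, blocks => if cur.isEmpty then blocks else blocks ++ [cur]
  | raw :: rest, cur, blocks =>
    let line := PySem.Str.strip raw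
    if (line == "") || PySem.Str.startswith line "#" then
      if cur.isEmpty then pvBlocksB rest cur blocks
      else pvBlocksB rest [] (blocks ++ [cur])
    else pvBlocksB rest (cur ++ [line]) blocks

-- blocks are never empty, so 'block[0]' is headD "" here
def parse_vis_py_alt (text : String) : List (String × List String) :=
  let blocks := pvBlocksB (PySem.Str.splitlines text) [] []
  (blocks.foldl
    (fun d b => d.insert (PySem.Str.lower (b.headD "")) ((b.drop 1).map PySem.Str.lower))
    PySem.Dict.empty).items

-- ===== PRECONDITION & SPEC =====
def Spec_parse_vis_py (text : String) (out : List (String × List String)) : Prop := out = parse_vis_py_alt text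
instance (text : String) (out : List (String × List String)) : Decidable (Spec_parse_vis_py text out) := by unfold Spec_parse_vis_py; infer_instance

-- ===== CLAIM (what is proved, stated in full; the proofs are below) =====
def Claim_equal_parse_vis_py : Prop := ∀ (text : String), Dom_parse_vis_py text → Spec_parse_vis_py text (parse_vis_py text)

-- ===== LEMMAS AND PROOFS =====

-- proof-side: separator test shared by both ports
def pvSep (l : String) : Bool := (l == "") || PySem.Str.startswith l "#"

-- prefix of non-separator lines (raw) and the rest after the consumed separator
def pvRawTill : List String → List String
  | [] => []
  | v :: r => if pvSep v then [] else v :: pvRawTill r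

def pvRestAfter : List String → List String
  | [] => []
  | v :: r => if pvSep v then r else pvRestAfter r

-- B's grouping, already on stripped lines
def pvBlocksS : List String → List String → List (List String) → List (List String)
  | [], cur, blocks => if cur.isEmpty then blocks else blocks ++ [cur]
  | l :: rest, cur, blocks =>
    if pvSep l then
      if cur.isEmpty then pvBlocksS rest cur blocks
      else pvBlocksS rest [] (blocks ++ [cur])
    else pvBlocksS rest (cur ++ [l]) blocks

theorem pvBlocksB_eq_S (raws : List String) (cur : List String) (blocks : List (List String)) :
    pvBlocksB raws cur blocks = pvBlocksS (raws.map PySem.Str.strip) cur blocks := by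
  induction raws generalizing cur blocks with
  | nil => rfl
  | cons v r ih => simp only [pvBlocksB, pvBlocksS, List.map, pvSep]; split <;> [skip; exact ih _ _] <;> split <;> exact ih _ _

theorem pvCollectA_spec (ls : List String) :
    pvCollectA ls = ((pvRawTill ls).map PySem.Str.lower, pvRestAfter ls) := by
  induction ls with
  | nil => rfl
  | cons v r ih =>
    simp only [pvCollectA, pvRawTill, pvRestAfter, pvSep]
    split <;> simp_all

theorem pvRestAfter_len (ls : List String) : (pvRestAfter ls).length ≤ ls.length := by
  induction ls with
  | nil => simp [pvRestAfter]
  | cons v r ih => simp only [pvRestAfter]; split <;> simp <;> omega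

theorem pvBlocksS_acc (ls : List String) (cur : List String) (blocks : List (List String)) :
    pvBlocksS ls cur blocks = blocks ++ pvBlocksS ls cur [] := by
  induction ls generalizing cur blocks with
  | nil => simp only [pvBlocksS]; split <;> simp
  | cons l r ih =>
    simp only [pvBlocksS]
    split
    · split
      · exact ih _ _
      · rw [ih [] (blocks ++ [cur])]; simp only [List.nil_append]; rw [ih [] [cur]]; simp
    · exact ih _ _

theorem pvBlocksS_nonempty_cur (ls : List String) (cur : List String) (blocks : List (List String))
    (h : cur ≠ []) :
    pvBlocksS ls cur blocks = pvBlocksS (pvRestAfter ls) [] (blocks ++ [cur ++ pvRawTill ls]) := by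
  induction ls generalizing cur blocks with
  | nil => simp only [pvBlocksS, pvRawTill, pvRestAfter]; simp [h]
  | cons l r ih =>
    simp only [pvBlocksS, pvRawTill, pvRestAfter]
    split
    · simp [List.isEmpty_iff, h]
    · rw [ih _ _ (by simp)]; simp

theorem pvMain (n : Nat) (ls : List String) (d : PySem.Dict String (List String))
    (hn : ls.length ≤ n) :
    pvLoopA ls d =
      (pvBlocksS ls [] []).foldl
        (fun d b => d.insert (PySem.Str.lower (b.headD "")) ((b.drop 1).map PySem.Str.lower)) d := by
  induction n generalizing ls d with
  | zero =>
    have : ls = [] := by cases ls <;> simp_all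
    subst this; simp [pvLoopA, pvBlocksS]
  | succ n ih =>
    cases ls with
    | nil => simp [pvLoopA, pvBlocksS]
    | cons l rest =>
      by_cases hs : pvSep l = true
      · have hs' : ((l == "") || PySem.Str.startswith l "#") = true := hs
        simp only [pvLoopA, pvBlocksS, hs', hs, if_true, List.isEmpty_nil]
        exact ih rest d (by simp at hn ⊢; omega)
      · have hsf : pvSep l = false := by simpa using hs
        have hs' : ((l == "") || PySem.Str.startswith l "#") = false := by simpa [pvSep] using hsf
        simp only [pvLoopA, pvBlocksS, hs', hsf, Bool.false_eq_true, if_false, List.nil_append]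
        rw [pvCollectA_spec]
        dsimp only
        rw [pvBlocksS_nonempty_cur rest [l] [] (by simp), pvBlocksS_acc, List.nil_append]
        simp only [List.singleton_append, List.foldl_cons]
        rw [ih (pvRestAfter rest) _ (by have := pvRestAfter_len rest; simp at hn; omega)]
        simp

-- ===== VERDICT (by name: the statement is the Claim_ definition above) =====
theorem parse_vis_py_spec : Claim_equal_parse_vis_py := by
  intro text _
  unfold Spec_parse_vis_py parse_vis_py parse_vis_py_alt
  rw [pvBlocksB_eq_S, pvMain ((PySem.Str.splitlines text).map PySem.Str.strip).length _ _ le_rfl]
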